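-- pv_equiv track=rewrite | github.com/RicardoChCz/StochasticTopologyRCC | Python/rigidExpansions.py | verifyIny1
-- ===== SOURCE A (Python) =====
-- def verifyIny1(f):
--     """
--     Verifies if the function f is inyective.
--     Input:
--     Output: Boolean
--     """
--     n=len(f)
--     S=set()
--     for i in f:
--         S.add(i[1])
--
--     if n!= len(S):
--         return False
--     else:
--         return True
-- ===== SOURCE B (Python) =====
-- def verifyIny1(f):
--     """
--     Verifies if the function f is inyective.
--     Sort-then-scan: sort the second coordinates and check that no two
--     adjacent values in the sorted order are equal (no set is used).
--     """
--     ys = sorted(p[1] for p in f)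
--     return all(a != b for a, b in zip(ys, ys[1:]))
-- ===== Notes on version B (the rewrite author's own statement) =====
-- stated objective: alternative
-- what changed: Replaces A's hash-set-plus-cardinality check with a sort-then-scan algorithm: sort the second coordinates and verify that no two adjacent values in the sorted order are equal, using no set at all.
import Mathlib
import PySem

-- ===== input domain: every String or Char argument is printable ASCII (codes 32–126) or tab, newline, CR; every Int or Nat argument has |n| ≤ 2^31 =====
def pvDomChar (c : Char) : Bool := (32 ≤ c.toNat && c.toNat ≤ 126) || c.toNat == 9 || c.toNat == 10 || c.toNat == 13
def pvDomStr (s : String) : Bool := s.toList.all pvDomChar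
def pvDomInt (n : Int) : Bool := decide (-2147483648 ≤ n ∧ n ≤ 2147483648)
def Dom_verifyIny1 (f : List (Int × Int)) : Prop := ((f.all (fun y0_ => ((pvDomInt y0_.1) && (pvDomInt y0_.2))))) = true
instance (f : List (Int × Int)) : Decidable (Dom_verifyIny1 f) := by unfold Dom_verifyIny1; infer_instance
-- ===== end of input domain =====

-- B replaces A's hash-set-plus-cardinality check with sort-then-scan over adjacent sorted values (objective: alternative).

-- ===== PORT A =====
-- n = len(f); S = set(); for i in f: S.add(i[1]); return not (n != len(S))
def verifyIny1 (f : List (Int × Int)) : Bool :=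
  let n := f.length
  let S : PySem.Set Int := f.foldl (fun s i => PySem.Set.add s i.2) PySem.Set.empty
  if n ≠ S.length then false else true

-- ===== PORT B =====
-- all(a != b for a, b in zip(ys, ys[1:])) : scan adjacent pairs of the sorted list
def adjDistinct : List Int → Bool
  | a :: b :: t => (a != b) && adjDistinct (b :: t)
  | _ => true

-- ys = sorted(p[1] for p in f); return all(a != b for a, b in zip(ys, ys[1:]))
def verifyIny1_alt (f : List (Int × Int)) : Bool :=
  adjDistinct (PySem.List.sorted (f.map Prod.snd) (fun x => x) false)

-- ===== PRECONDITION & SPEC =====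
def Spec_verifyIny1 (f : List (Int × Int)) (out : Bool) : Prop := out = verifyIny1_alt f
instance (f : List (Int × Int)) (out : Bool) : Decidable (Spec_verifyIny1 f out) := by unfold Spec_verifyIny1; infer_instance

-- ===== CLAIM (what is proved, stated in full; the proofs are below) =====
def Claim_equal_verifyIny1 : Prop := ∀ (f : List (Int × Int)), Dom_verifyIny1 f → Spec_verifyIny1 f (verifyIny1 f)

-- ===== LEMMAS AND PROOFS =====

-- |set(xs)| = |xs| iff xs has no duplicates
theorem length_ofList_eq_iff_nodup (xs : List Int) :
    (PySem.Set.ofList xs).length = xs.length ↔ xs.Nodup := by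
  induction xs using List.reverseRecOn with
  | nil => simp [PySem.Set.ofList]
  | append_singleton xs x ih =>
    rw [PySem.Set.ofList_append_singleton]
    by_cases hx : x ∈ xs
    · have hmem : x ∈ PySem.Set.ofList xs := (PySem.Set.mem_ofList xs x).2 hx
      rw [PySem.Set.add_of_mem hmem]
      have hle := PySem.Set.length_ofList_le (xs := xs)
      simp only [List.length_append, List.length_singleton]
      constructor
      · intro h; omega
      · intro h
        exact absurd hx (by
          have := (List.nodup_append.mp h).2.2
          simpa using this x hx)
    · have hmem : x ∉ PySem.Set.ofList xs := fun h => hx ((PySem.Set.mem_ofList xs x).1 h)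
      rw [PySem.Set.add_of_not_mem hmem]
      simp only [List.length_append, List.length_singleton]
      rw [List.nodup_append]
      constructor
      · intro h
        refine ⟨ih.1 (by omega), List.nodup_singleton x, ?_⟩
        intro a ha b hb
        simp at hb; subst hb
        exact fun hab => hx (hab ▸ ha)
      · intro ⟨h1, _, h3⟩
        have := ih.2 h1
        omega

-- on a ≤-sorted list, the adjacent-distinct scan decides Nodup
theorem adjDistinct_iff_nodup (l : List Int) (hs : l.Pairwise (· ≤ ·)) :
    adjDistinct l = true ↔ l.Nodup := by
  induction l with
  | nil => simp [adjDistinct]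
  | cons a l ih =>
    rcases List.pairwise_cons.1 hs with ⟨hale, hl⟩
    cases l with
    | nil => simp [adjDistinct]
    | cons b t =>
      have hble : ∀ x ∈ b :: t, b ≤ x := by
        intro x hx
        rcases List.mem_cons.1 hx with h | h
        · exact h ▸ le_refl b
        · exact List.rel_of_pairwise_cons hl h
      rw [show adjDistinct (a :: b :: t) = ((a != b) && adjDistinct (b :: t)) from rfl,
          Bool.and_eq_true, List.nodup_cons (a := a) (l := b :: t), ih hl, bne_iff_ne]
      constructor
      · rintro ⟨hab, hnd⟩
        refine ⟨?_, hnd⟩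
        intro hmem
        have h1 : a ≤ b := hale b (List.mem_cons_self)
        have h2 : b ≤ a := hble a hmem
        exact hab (le_antisymm h1 h2)
      · rintro ⟨hnm, hnd⟩
        exact ⟨fun h => hnm (h ▸ List.mem_cons_self), hnd⟩

-- B decides Nodup of the second coordinates
theorem alt_iff_nodup (f : List (Int × Int)) :
    verifyIny1_alt f = true ↔ (f.map Prod.snd).Nodup := by
  unfold verifyIny1_alt
  have hperm := PySem.List.sorted_perm (xs := f.map Prod.snd) (key := fun x => x) (rev := false)
  have hpw := PySem.List.sorted_pairwise (xs := f.map Prod.snd) (key := fun x => x)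
  rw [adjDistinct_iff_nodup _ hpw]
  exact hperm.nodup_iff

-- ===== VERDICT (by name: the statement is the Claim_ definition above) =====
theorem verifyIny1_spec : Claim_equal_verifyIny1 := by
  intro f _
  unfold Spec_verifyIny1 verifyIny1
  rw [← PySem.Set.update_map_eq_foldl_add (f := Prod.snd) (l := f) (s := PySem.Set.empty)]
  have hupd : PySem.Set.update PySem.Set.empty (f.map Prod.snd)
      = PySem.Set.ofList (f.map Prod.snd) := PySem.Set.update_nil_left _
  rw [hupd]
  by_cases hn : (f.map Prod.snd).Nodup
  · have hlen : (PySem.Set.ofList (f.map Prod.snd)).length = (f.map Prod.snd).length :=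
      (length_ofList_eq_iff_nodup _).2 hn
    rw [(alt_iff_nodup f).2 hn, if_neg]
    rw [hlen, List.length_map]
    omega
  · have hlen : (PySem.Set.ofList (f.map Prod.snd)).length ≠ (f.map Prod.snd).length :=
      fun h => hn ((length_ofList_eq_iff_nodup _).1 h)
    have hB : verifyIny1_alt f = false := by
      cases h : verifyIny1_alt f
      · rfl
      · exact absurd ((alt_iff_nodup f).1 h) hn
    rw [hB, if_pos]
    rw [List.length_map] at hlen
    omega
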